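-- pv_equiv track=rewrite | github.com/hdank/ai_digitization | utils/api_service.py | get_provider_from_model
-- ===== SOURCE A (Python) =====
-- def get_provider_from_model(model):
--     """Get the provider name from the model name"""
--     PROVIDERS_MODELS = {
--         'openai': {'gpt-3.5-turbo', 'gpt-4'},
--         'google': {'gemini'},
--     }
--     for provider, models in PROVIDERS_MODELS.items():
--         if model in models:
--             return provider
--     return None
-- ===== SOURCE B (Python) =====
-- MODEL_TO_PROVIDER = {
--     'gpt-3.5-turbo': 'openai',
--     'gpt-4': 'openai',
--     'gemini': 'google',
-- }
--
-- def get_provider_from_model(model):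
--     """Get the provider name from the model name"""
--     return MODEL_TO_PROVIDER.get(model)
-- ===== Notes on version B (the rewrite author's own statement) =====
-- stated objective: idiomatic
-- what changed: B replaces the loop over providers with a membership test per provider by a module-level inverted dict mapping each model name to its provider, so the answer is a single dict.get with no loop or branch.
import Mathlib
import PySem

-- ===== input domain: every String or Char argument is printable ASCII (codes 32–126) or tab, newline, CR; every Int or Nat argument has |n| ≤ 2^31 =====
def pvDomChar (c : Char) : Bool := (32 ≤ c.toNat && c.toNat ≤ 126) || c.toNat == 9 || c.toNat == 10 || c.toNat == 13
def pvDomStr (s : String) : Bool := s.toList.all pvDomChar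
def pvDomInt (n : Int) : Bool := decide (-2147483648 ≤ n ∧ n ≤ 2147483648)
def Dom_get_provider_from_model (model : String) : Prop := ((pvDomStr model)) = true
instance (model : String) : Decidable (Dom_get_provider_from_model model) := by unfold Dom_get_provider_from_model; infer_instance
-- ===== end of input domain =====

-- B replaces A's loop over the provider table (with a set-membership branch) by a
-- precomputed inverted model→provider dict, answered with a single dict lookup.

-- ===== PORT A =====
-- A's for-loop over PROVIDERS_MODELS.items(): structural recursion, first provider whose set contains model
def pvLoopA (model : String) : List (String × PySem.Set String) → Option String
  | [] => none
  | (provider, models) :: rest =>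
      if PySem.Set.contains models model then some provider else pvLoopA model rest

def get_provider_from_model (model : String) : Option String :=
  let PROVIDERS_MODELS : List (String × PySem.Set String) :=
    [("openai", PySem.Set.ofList ["gpt-3.5-turbo", "gpt-4"]),
     ("google", PySem.Set.ofList ["gemini"])]
  pvLoopA model PROVIDERS_MODELS

-- ===== PORT B =====
-- the module-level inverted dict MODEL_TO_PROVIDER
def pvModelToProvider : PySem.Dict String String :=
  PySem.Dict.ofList [("gpt-3.5-turbo", "openai"), ("gpt-4", "openai"), ("gemini", "google")]

def get_provider_from_model_alt (model : String) : Option String :=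
  PySem.Dict.get? pvModelToProvider model

-- ===== PRECONDITION & SPEC =====
def Spec_get_provider_from_model (model : String) (out : Option String) : Prop := out = get_provider_from_model_alt model
instance (model : String) (out : Option String) : Decidable (Spec_get_provider_from_model model out) := by unfold Spec_get_provider_from_model; infer_instance

-- ===== CLAIM (what is proved, stated in full; the proofs are below) =====
def Claim_equal_get_provider_from_model : Prop := ∀ (model : String), Dom_get_provider_from_model model → Spec_get_provider_from_model model (get_provider_from_model model)

-- ===== LEMMAS AND PROOFS =====
theorem pvModelToProvider_items : pvModelToProvider.items =
    [("gpt-3.5-turbo", "openai"), ("gpt-4", "openai"), ("gemini", "google")] := by decide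

-- ===== VERDICT (by name: the statement is the Claim_ definition above) =====
theorem get_provider_from_model_spec : Claim_equal_get_provider_from_model := by
  intro model _
  unfold Spec_get_provider_from_model get_provider_from_model get_provider_from_model_alt
  by_cases h1 : model = "gpt-3.5-turbo" <;>
  by_cases h2 : model = "gpt-4" <;>
  by_cases h3 : model = "gemini" <;>
  simp_all [pvLoopA, PySem.Set.contains, PySem.Set.ofList,
            PySem.Dict.get?, pvModelToProvider_items, PySem.Set.add, PySem.Set.empty] <;>
  exact ⟨fun h => h1 h.symm, fun h => h2 h.symm, fun h => h3 h.symm⟩
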